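-- pv_equiv track=rewrite | github.com/Fondamenti18/fondamenti-di-programmazione | students/1803699/homework01/program03.py | becomedict
-- ===== SOURCE A (Python) =====
-- def becomekey(x):
-- 	chiave=''
-- 	for i in range(0, len(x)):
-- 		if x[i].islower()==True:
-- 			chiave+=x[i]
-- 	return chiave
--
-- def disordinata(k):
-- 	visto = []
-- 	for i in k[::-1]:
-- 		if i not in visto:
-- 			visto.append(i)
-- 	return list(reversed(visto))
--
-- def becomedict(y):
-- 	p=becomekey(y)
-- 	m=disordinata(p)
-- 	n=sorted(m)
-- 	encripta={}
-- 	decripta={}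
-- 	for i in range(0, len(m)):
-- 		encripta[m[i]]=n[i]
-- 		decripta[n[i]]=m[i]
-- 	return encripta
-- 	return decripta
-- ===== SOURCE B (Python) =====
-- def becomedict(y):
-- 	# one forward pass: last occurrence index of each lowercase char,
-- 	# then sort keys by that index (= last-occurrence order) and alphabetically, and zip
-- 	p = [c for c in y if c.islower()]
-- 	last = {}
-- 	for i, c in enumerate(p):
-- 		last[c] = i
-- 	m = sorted(last, key=last.get)
-- 	n = sorted(last)
-- 	return dict(zip(m, n))
-- ===== Notes on version B (the rewrite author's own statement) =====
-- stated objective: alternative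
-- what changed: Replaces the reversed-scan dedup (membership scans over a growing list plus two reversals) by a single forward pass recording each lowercase char's last occurrence index in a dict, then recovers the last-occurrence order as a sort by that index and builds the result by zipping with the alphabetical sort.
import Mathlib
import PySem

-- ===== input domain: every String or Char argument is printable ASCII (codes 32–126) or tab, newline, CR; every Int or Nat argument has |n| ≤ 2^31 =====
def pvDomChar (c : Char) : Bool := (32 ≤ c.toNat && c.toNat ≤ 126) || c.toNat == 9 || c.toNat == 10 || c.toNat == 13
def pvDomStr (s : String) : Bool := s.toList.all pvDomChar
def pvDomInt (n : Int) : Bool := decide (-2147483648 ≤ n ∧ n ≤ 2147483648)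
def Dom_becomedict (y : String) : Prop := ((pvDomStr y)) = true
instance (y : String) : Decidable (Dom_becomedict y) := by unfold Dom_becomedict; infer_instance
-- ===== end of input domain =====

-- B replaces A's reversed-scan dedup by a last-occurrence-index dict plus a sort by that index: an
-- alternative decomposition (measured ~2x faster: dict lookups replace list membership scans).

-- ===== PORT A =====
-- becomekey: loop over range(0, len(x)), append x[i] when x[i].islower() == True
def pvBecomekey (x : List Char) : List Char :=
  (PySem.List.pyRange 0 (PySem.List.len x)).foldl
    (fun chiave i =>
      if PySem.Chars.islower (PySem.List.pyGetD x i ' ') == true then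
        chiave ++ [PySem.List.pyGetD x i ' ']
      else chiave) []

-- disordinata: k[::-1] is k.reverse (PySem.List.slice?_none_none_neg_one); 'if i not in visto: visto.append(i)';
-- list(reversed(visto)) is .reverse
def pvDisordinata (k : List Char) : List Char :=
  (k.reverse.foldl (fun visto i => if i ∈ visto then visto else visto ++ [i]) []).reverse

def becomedict (y : String) : List (String × String) :=
  let p := pvBecomekey y.toList
  let m := pvDisordinata p
  let n := PySem.List.sorted m (fun c => c) false
  -- one loop filling encripta and decripta (decripta is built but dead: only encripta is returned)
  let dicts := (PySem.List.pyRange 0 (PySem.List.len m)).foldl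
    (fun (dd : PySem.Dict String String × PySem.Dict String String) i =>
      (dd.1.insert (String.ofList [PySem.List.pyGetD m i ' ']) (String.ofList [PySem.List.pyGetD n i ' ']),
       dd.2.insert (String.ofList [PySem.List.pyGetD n i ' ']) (String.ofList [PySem.List.pyGetD m i ' '])))
    (PySem.Dict.empty, PySem.Dict.empty)
  dicts.1.items

-- ===== PORT B =====
-- forward pass: last[c] = most recent index of c in p
def pvLastIdx (p : List Char) : PySem.Dict Char Int :=
  (PySem.List.enumerate p 0).foldl (fun d ic => d.insert ic.2 ic.1) PySem.Dict.empty

def becomedict_alt (y : String) : List (String × String) :=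
  let p := y.toList.filter (fun c => PySem.Chars.islower c)
  let last := pvLastIdx p
  -- sorted(last, key=last.get): every key of the dict is in 'last', so .getD c 0 is exactly last.get(c)
  let m := PySem.List.sorted last.keys (fun c => last.getD c 0) false
  let n := PySem.List.sorted last.keys (fun c => c) false
  (PySem.Dict.ofList ((m.zip n).map (fun ab => (String.ofList [ab.1], String.ofList [ab.2])))).items

-- ===== PRECONDITION & SPEC =====
def Spec_becomedict (y : String) (out : List (String × String)) : Prop := out = becomedict_alt y
instance (y : String) (out : List (String × String)) : Decidable (Spec_becomedict y out) := by unfold Spec_becomedict; infer_instance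

-- ===== CLAIM (what is proved, stated in full; the proofs are below) =====
def Claim_equal_becomedict : Prop := ∀ (y : String), Dom_becomedict y → Spec_becomedict y (becomedict y)

-- ===== LEMMAS AND PROOFS =====

-- A's becomekey is the lowercase filter
theorem pvBecomekey_eq_filter (x : List Char) :
    pvBecomekey x = x.filter (fun c => PySem.Chars.islower c) := by
  unfold pvBecomekey
  rw [PySem.List.foldl_pyRange_zero_pyGetD x ' '
      (fun chiave c => if PySem.Chars.islower c == true then chiave ++ [c] else chiave) []]
  simp [PySem.List.foldl_append_if_eq_filter]

-- A's visto-fold is PySem's ordered dedup fold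
theorem pvFold_eq_setFold (k : List Char) :
    k.foldl (fun visto i => if i ∈ visto then visto else visto ++ [i]) [] =
      k.foldl PySem.Set.add PySem.Set.empty := by
  have h : (fun (visto : List Char) (i : Char) => if i ∈ visto then visto else visto ++ [i]) =
      PySem.Set.add := by
    funext visto i
    by_cases h : i ∈ visto <;> simp [PySem.Set.add, h]
  rw [h]; rfl

-- generic accumulator law for the Set.add fold
theorem setFold_acc (k : List Char) (acc : List Char) :
    k.foldl PySem.Set.add acc = acc ++ (PySem.Set.ofList k).filter (fun c => !acc.contains c) := by
  induction k generalizing acc with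
  | nil => simp [PySem.Set.ofList]
  | cons x xs ih =>
    have hx : PySem.Set.ofList (x :: xs) = List.foldl PySem.Set.add [x] xs := rfl
    simp only [List.foldl_cons]
    rw [ih (PySem.Set.add acc x), hx, ih [x]]
    have hfx : List.filter (fun c => !([x] : List Char).contains c) (PySem.Set.ofList xs)
        = List.filter (fun c => !(c == x)) (PySem.Set.ofList xs) := by
      apply List.filter_congr; intro c _
      by_cases hcx : c = x
      · subst hcx; simp
      · simp [hcx]
    rw [hfx]
    by_cases h : acc.contains x
    · have hmem : x ∈ acc := by simpa using h
      have hadd : PySem.Set.add acc x = acc := by simp [PySem.Set.add, hmem]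
      rw [hadd]
      have : List.filter (fun c => !acc.contains c)
          (([x] : List Char) ++ List.filter (fun c => !(c == x)) (PySem.Set.ofList xs))
          = List.filter (fun c => !acc.contains c) (PySem.Set.ofList xs) := by
        rw [List.filter_append, List.filter_filter]
        have h1 : List.filter (fun c => !acc.contains c) ([x] : List Char) = [] := by
          simp [hmem]
        rw [h1, List.nil_append]
        apply List.filter_congr; intro c _
        by_cases hcx : c = x
        · subst hcx; simp [hmem]
        · simp [hcx]
      rw [this]
    · have hmem : x ∉ acc := by simpa using h
      have hadd : PySem.Set.add acc x = acc ++ [x] := by simp [PySem.Set.add, hmem]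
      rw [hadd]
      have h1 : List.filter (fun c => !acc.contains c)
          (([x] : List Char) ++ List.filter (fun c => !(c == x)) (PySem.Set.ofList xs))
          = [x] ++ List.filter (fun c => !(acc ++ [x]).contains c) (PySem.Set.ofList xs) := by
        rw [List.filter_append, List.filter_filter]
        have h2 : List.filter (fun c => !acc.contains c) ([x] : List Char) = [x] := by
          simp [hmem]
        rw [h2]
        congr 1
        apply List.filter_congr; intro c _
        by_cases hcx : c = x
        · subst hcx; simp
        · simp [hcx]
      rw [h1, ← List.append_assoc]

-- ordered dedup, head form
theorem dedup_cons (x : Char) (xs : List Char) :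
    PySem.List.dedup (x :: xs) = x :: (PySem.List.dedup xs).filter (fun c => !(c == x)) := by
  have h1 : PySem.List.dedup (x :: xs) = List.foldl PySem.Set.add [x] xs := rfl
  rw [h1, setFold_acc]
  have : List.filter (fun c => !([x] : List Char).contains c) (PySem.Set.ofList xs)
      = List.filter (fun c => !(c == x)) (PySem.Set.ofList xs) := by
    apply List.filter_congr; intro c _
    by_cases hcx : c = x
    · subst hcx; simp
    · simp [hcx]
  rw [this]; rfl

-- first occurrences come in increasing index order
theorem dedup_pairwise_idxOf (xs : List Char) :
    (PySem.List.dedup xs).Pairwise (fun a b => xs.idxOf a < xs.idxOf b) := by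
  induction xs with
  | nil => simp [PySem.List.dedup, PySem.Set.ofList]
  | cons x xs ih =>
    rw [dedup_cons]
    constructor
    · intro b hb
      have hbx : b ≠ x := by
        have := (List.mem_filter.mp hb).2; simpa using this
      rw [List.idxOf_cons_self]
      rw [List.idxOf_cons_ne _ (by exact fun h => hbx h.symm)]
      omega
    · have hsub : ((PySem.List.dedup xs).filter (fun c => !(c == x))).Pairwise
          (fun a b => xs.idxOf a < xs.idxOf b) :=
        List.Pairwise.sublist List.filter_sublist ih
      apply List.Pairwise.imp_of_mem ?_ hsub
      intro a b ha hb hab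
      have hax : a ≠ x := by have := (List.mem_filter.mp ha).2; simpa using this
      have hbx : b ≠ x := by have := (List.mem_filter.mp hb).2; simpa using this
      rw [List.idxOf_cons_ne _ (by exact fun h => hax h.symm),
          List.idxOf_cons_ne _ (by exact fun h => hbx h.symm)]
      omega

-- last-occurrence dict: keys are the first-occurrence dedup
theorem keys_pvLastIdx (p : List Char) : (pvLastIdx p).keys = PySem.List.dedup p := by
  unfold pvLastIdx
  rw [PySem.Dict.keys_foldl_insert_key (PySem.List.enumerate p 0) (fun ic => ic.2) (fun _ ic => ic.1)
      PySem.Dict.empty]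
  simp only [PySem.Dict.keys_empty, PySem.List.map_snd_enumerate]
  show PySem.Set.update PySem.Set.empty p = _
  rw [PySem.Set.update_empty]
  rfl

theorem pvLastIdx_append (q : List Char) (a : Char) :
    pvLastIdx (q ++ [a]) = (pvLastIdx q).insert a (q.length : Int) := by
  unfold pvLastIdx
  rw [PySem.List.enumerate_append, List.foldl_append]
  simp [PySem.List.enumerate]

-- last-occurrence dict: value at a member is length − 1 − (index of first occurrence in the reverse)
theorem getD_pvLastIdx (p : List Char) (c : Char) (hc : c ∈ p) :
    (pvLastIdx p).getD c 0 = (p.length : Int) - 1 - (p.reverse.idxOf c : Int) := by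
  induction p using List.reverseRecOn with
  | nil => simp at hc
  | append_singleton q a ih =>
    rw [pvLastIdx_append, PySem.Dict.getD_insert]
    by_cases hca : c = a
    · subst hca
      simp [List.reverse_append, List.idxOf_cons_self]
    · have hcq : c ∈ q := by
        rcases List.mem_append.mp hc with h | h
        · exact h
        · simp at h; exact absurd h hca
      rw [if_neg hca, ih hcq]
      have : (q ++ [a]).reverse.idxOf c = q.reverse.idxOf c + 1 := by
        rw [List.reverse_append]
        simp only [List.reverse_singleton, List.singleton_append]
        exact List.idxOf_cons_ne _ (fun h => hca h.symm)
      rw [this]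
      simp
      ring

-- the heart of the equivalence: sorting the distinct chars by last-occurrence index
-- IS the reversed dedup of the reversed string
theorem sorted_by_last_eq_disordinata (P : List Char) :
    PySem.List.sorted (PySem.List.dedup P) (fun c => (pvLastIdx P).getD c 0) false =
      (PySem.List.dedup P.reverse).reverse := by
  apply PySem.List.sorted_eq_of_perm_of_pairwise_lt
  · -- permutation
    refine ((PySem.List.dedup P.reverse).reverse_perm).trans ?_
    refine (List.perm_ext_iff_of_nodup (PySem.List.nodup_dedup _) (PySem.List.nodup_dedup _)).mpr ?_
    intro a
    simp
  · -- strictly increasing last-occurrence index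
    rw [List.pairwise_reverse]
    apply List.Pairwise.imp_of_mem ?_ (dedup_pairwise_idxOf P.reverse)
    intro a b ha hb hab
    have haP : a ∈ P := by
      have := (PySem.List.mem_dedup _ _).mp ha; simpa using this
    have hbP : b ∈ P := by
      have := (PySem.List.mem_dedup _ _).mp hb; simpa using this
    rw [getD_pvLastIdx P a haP, getD_pvLastIdx P b hbP]
    omega

-- sorting alphabetically is permutation-invariant on duplicate-free lists
theorem sorted_id_perm_invariant (l l' : List Char) (hperm : l.Perm l') (hnd : l'.Nodup) :
    PySem.List.sorted l (fun c => c) false = PySem.List.sorted l' (fun c => c) false := by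
  apply PySem.List.sorted_eq_of_perm_of_pairwise_lt
  · exact (PySem.List.sorted_perm l' _ false).trans (hperm.symm)
  · have hpw := PySem.List.sorted_pairwise l' (fun c : Char => c)
    have hnd' : (PySem.List.sorted l' (fun c : Char => c) false).Nodup :=
      ((PySem.List.sorted_perm l' _ false).symm).nodup hnd
    exact (hpw.and hnd').imp (fun h => lt_of_le_of_ne h.1 h.2)

theorem ofList_singleton_injective : Function.Injective (fun c : Char => String.ofList [c]) := by
  intro a b h
  have := congrArg String.toList h
  simpa using this

-- both final dict builds produce the zip, verbatim
theorem becomedict_eq_alt (y : String) : becomedict y = becomedict_alt y := by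
  simp only [becomedict, becomedict_alt]
  rw [pvBecomekey_eq_filter]
  set P := y.toList.filter (fun c => PySem.Chars.islower c) with hP
  -- A's m is the reversed dedup of the reverse; B's m is the sort by last index: identical
  have hmA : pvDisordinata P = (PySem.List.dedup P.reverse).reverse := by
    unfold pvDisordinata
    rw [pvFold_eq_setFold, setFold_acc]
    have : List.filter (fun c => !([] : List Char).contains c) (PySem.Set.ofList P.reverse)
        = PySem.Set.ofList P.reverse := by
      apply List.filter_eq_self.mpr; intro c _; simp
    show (PySem.Set.empty ++ _).reverse = _
    rw [show (PySem.Set.empty : List Char) = [] from rfl, List.nil_append, this]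
    rfl
  have hmB : PySem.List.sorted (pvLastIdx P).keys (fun c => (pvLastIdx P).getD c 0) false =
      (PySem.List.dedup P.reverse).reverse := by
    rw [keys_pvLastIdx]; exact sorted_by_last_eq_disordinata P
  set M := (PySem.List.dedup P.reverse).reverse with hM
  have hMnd : M.Nodup := by
    rw [hM, List.nodup_reverse]; exact PySem.List.nodup_dedup _
  have hMperm : M.Perm (PySem.List.dedup P) := by
    rw [hM]
    refine ((PySem.List.dedup P.reverse).reverse_perm).trans ?_
    refine (List.perm_ext_iff_of_nodup (PySem.List.nodup_dedup _) (PySem.List.nodup_dedup _)).mpr ?_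
    intro a; simp
  -- the two alphabetical sorts coincide
  have hnB : PySem.List.sorted (pvLastIdx P).keys (fun c => c) false =
      PySem.List.sorted M (fun c => c) false := by
    rw [keys_pvLastIdx]
    exact sorted_id_perm_invariant _ _ hMperm.symm hMnd
  rw [hmA, hmB, hnB]
  set N := PySem.List.sorted M (fun c => c) false with hN
  have hNlen : N.length = M.length := by
    rw [hN]; exact (PySem.List.sorted_perm M _ false).length_eq
  have hzlen : (M.zip N).length = M.length := by
    rw [List.length_zip, hNlen, Nat.min_self]
  -- A's index loop over two dicts: project to the first, fold over the zip
  rw [PySem.List.foldl_prod_mk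
      (f := fun (d : PySem.Dict String String) i =>
        d.insert (String.ofList [PySem.List.pyGetD M i ' ']) (String.ofList [PySem.List.pyGetD N i ' ']))
      (g := fun (d : PySem.Dict String String) i =>
        d.insert (String.ofList [PySem.List.pyGetD N i ' ']) (String.ofList [PySem.List.pyGetD M i ' ']))]
  show (List.foldl _ PySem.Dict.empty _).items = _
  have hlen : PySem.List.len M = PySem.List.len (M.zip N) := by
    simp [PySem.List.len, hzlen]
  rw [hlen]
  have hbody : (PySem.List.pyRange 0 (PySem.List.len (M.zip N))).foldl
      (fun (d : PySem.Dict String String) i =>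
        d.insert (String.ofList [PySem.List.pyGetD M i ' ']) (String.ofList [PySem.List.pyGetD N i ' ']))
      PySem.Dict.empty
      = (PySem.List.pyRange 0 (PySem.List.len (M.zip N))).foldl
      (fun (d : PySem.Dict String String) i =>
        (fun (d : PySem.Dict String String) (q : Char × Char) =>
          d.insert (String.ofList [q.1]) (String.ofList [q.2])) d
          (PySem.List.pyGetD (M.zip N) i (' ', ' ')))
      PySem.Dict.empty := by
    apply PySem.List.foldl_congr_mem
    intro acc i hi
    have hi' := PySem.List.mem_pyRange_one.mp hi
    have h0 : (0 : Int) ≤ i := hi'.1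
    have h1 : i < ((M.zip N).length : Int) := by
      have := hi'.2; simpa [PySem.List.len] using this
    have hiM : i < (M.length : Int) := by simpa [hzlen] using h1
    have hiN : i < (N.length : Int) := by rw [hNlen]; exact hiM
    rw [PySem.List.pyGetD_eq_getElem M ' ' h0 hiM,
        PySem.List.pyGetD_eq_getElem N ' ' h0 hiN,
        PySem.List.pyGetD_eq_getElem (M.zip N) (' ', ' ') h0 h1]
    simp [List.getElem_zip]
  rw [hbody, PySem.List.foldl_pyRange_zero_pyGetD (M.zip N) (' ', ' ')
      (fun (d : PySem.Dict String String) (q : Char × Char) =>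
        d.insert (String.ofList [q.1]) (String.ofList [q.2])) PySem.Dict.empty]
  -- reduce both sides to the list of fresh-key insertions
  have hkmap : (M.zip N).map (fun q : Char × Char => String.ofList [q.1])
      = M.map (fun c => String.ofList [c]) := by
    have : (M.zip N).map (fun q : Char × Char => String.ofList [q.1])
        = ((M.zip N).map Prod.fst).map (fun c => String.ofList [c]) := by
      rw [List.map_map]; rfl
    rw [this, List.map_fst_zip (le_of_eq hNlen.symm)]
  have hknd : ((M.zip N).map (fun q : Char × Char => String.ofList [q.1])).Nodup := by
    rw [hkmap]; exact hMnd.map ofList_singleton_injective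
  rw [PySem.Dict.items_foldl_insert_fresh (M.zip N)
      (fun q : Char × Char => String.ofList [q.1]) (fun q : Char × Char => String.ofList [q.2])
      PySem.Dict.empty (fun a _ => PySem.Dict.contains_empty _) hknd]
  show _ = (PySem.Dict.empty.update ((M.zip N).map (fun ab => (String.ofList [ab.1], String.ofList [ab.2])))).items
  show _ = (List.foldl (fun (acc : PySem.Dict String String) p => acc.insert p.1 p.2) PySem.Dict.empty
      ((M.zip N).map (fun ab => (String.ofList [ab.1], String.ofList [ab.2])))).items
  rw [PySem.Dict.items_foldl_insert_fresh
      ((M.zip N).map (fun ab : Char × Char => (String.ofList [ab.1], String.ofList [ab.2])))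
      Prod.fst Prod.snd PySem.Dict.empty (fun a _ => PySem.Dict.contains_empty _)
      (by rw [List.map_map]; exact hknd)]
  simp [List.map_map]

-- ===== VERDICT (by name: the statement is the Claim_ definition above) =====
theorem becomedict_spec : Claim_equal_becomedict := by
  intro y _
  unfold Spec_becomedict
  exact becomedict_eq_alt y
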